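-- pv_equiv track=rewrite | github.com/rangesus/logging-practice | Projekte/Python/wbia-tpl-lca-0135003703056e816f0f46c6b5d62040a78291af/cluster_tools.py | extract_subclustering
-- ===== SOURCE A (Python) =====
-- def build_node_to_cluster_mapping(clustering):
--     """
--     clustering: mapping from cluster id to set of node ids
--     node2cluster: mapping from node id to cluster id
--     """
--     node2cluster = {n: c for c in clustering for n in clustering[c]}
--     return node2cluster
--
-- def extract_subclustering(nodes, clustering, n2c=None):
--     if n2c is None:
--         n2c = build_node_to_cluster_mapping(clustering)
--     new_clustering = dict()
--     for n in nodes: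
--         c = n2c[n]
--         if c in new_clustering:
--             new_clustering[c].add(n)
--         else:
--             new_clustering[c] = set([n])
--     return new_clustering
-- ===== SOURCE B (Python) =====
-- def extract_subclustering(nodes, clustering, n2c=None):
--     if n2c is None:
--         n2c = {n: c for c in clustering for n in clustering[c]}
--     cids = [n2c[n] for n in nodes]
--     order = list(dict.fromkeys(cids))
--     return {c: {n for n, cc in zip(nodes, cids) if cc == c} for c in order}
-- ===== Notes on version B (the rewrite author's own statement) =====
-- stated objective: alternative
-- what changed: A accumulates a dict of sets in one pass (look up each node's cluster id, then add-or-create); B first materialises the per-node cluster-id list, dedups it in first-occurrence order, then builds each group with a comprehension over the (node, id) pairs.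
import Mathlib
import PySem

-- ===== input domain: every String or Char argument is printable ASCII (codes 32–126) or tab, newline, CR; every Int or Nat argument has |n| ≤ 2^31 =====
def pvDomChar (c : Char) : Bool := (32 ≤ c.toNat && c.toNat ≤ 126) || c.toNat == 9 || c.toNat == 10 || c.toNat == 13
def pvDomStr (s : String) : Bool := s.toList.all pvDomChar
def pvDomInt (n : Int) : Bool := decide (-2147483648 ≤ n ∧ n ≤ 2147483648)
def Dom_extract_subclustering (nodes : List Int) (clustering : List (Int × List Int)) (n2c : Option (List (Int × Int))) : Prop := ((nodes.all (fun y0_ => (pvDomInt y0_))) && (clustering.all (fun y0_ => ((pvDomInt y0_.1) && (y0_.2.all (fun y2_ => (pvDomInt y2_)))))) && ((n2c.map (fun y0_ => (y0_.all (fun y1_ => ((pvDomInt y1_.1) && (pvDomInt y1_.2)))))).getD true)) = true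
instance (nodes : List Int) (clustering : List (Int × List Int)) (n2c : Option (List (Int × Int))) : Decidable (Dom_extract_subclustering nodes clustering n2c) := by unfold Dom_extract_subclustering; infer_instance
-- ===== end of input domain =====

-- B replaces A's single-pass accumulate-into-a-dict-of-sets by a two-phase group-by: compute each
-- node's cluster id, dedup those ids in first-occurrence order, then build each group by a
-- comprehension over the (node, id) pairs (objective: alternative decomposition, same results).


-- ===== PORT A =====
-- build_node_to_cluster_mapping: {n: c for c in clustering for n in clustering[c]}
def buildN2C (clustering : List (Int × List Int)) : PySem.Dict Int Int :=
  let cd : PySem.Dict Int (List Int) := PySem.Dict.ofList clustering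
  cd.keys.foldl (fun m c => (cd.getD c []).foldl (fun m n => m.insert n c) m) PySem.Dict.empty

-- lookups n2c[n] are total here via getD 0; Pre_ (below) admits exactly the inputs where the
-- Python lookup succeeds (no KeyError), so the default is never seen on admitted inputs.
def extract_subclustering (nodes : List Int) (clustering : List (Int × List Int)) (n2c : Option (List (Int × Int))) : List (Int × List Int) :=
  let m : PySem.Dict Int Int := match n2c with
    | none => buildN2C clustering
    | some d => PySem.Dict.ofList d
  let nc : PySem.Dict Int (List Int) := nodes.foldl (fun nc n =>
      let c := m.getD n 0
      if nc.contains c then nc.modify c [] (fun s => PySem.Set.add s n)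
      else nc.insert c (PySem.Set.ofList [n])) PySem.Dict.empty
  nc.items

-- ===== PORT B =====
def extract_subclustering_alt (nodes : List Int) (clustering : List (Int × List Int)) (n2c : Option (List (Int × Int))) : List (Int × List Int) :=
  let m : PySem.Dict Int Int := match n2c with
    | none => buildN2C clustering
    | some d => PySem.Dict.ofList d
  let cids := nodes.map (fun n => m.getD n 0)
  let order := PySem.List.dedup cids
  order.map (fun c => (c, PySem.Set.ofList (((nodes.zip cids).filter (fun p => p.2 == c)).map (fun p => p.1))))

-- ===== PRECONDITION & SPEC =====
-- Pre_ excludes exactly the inputs where Python's n2c[n] raises KeyError: some node has no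
-- cluster id (not a key of the given n2c, resp. in no cluster's node set when n2c is None).
def Pre_extract_subclustering (nodes : List Int) (clustering : List (Int × List Int)) (n2c : Option (List (Int × Int))) : Prop :=
  (nodes.all (fun n =>
    match n2c with
    | none => (PySem.Dict.ofList clustering).items.any (fun p => p.2.contains n)
    | some d => d.any (fun p => p.1 == n))) = true
instance (nodes : List Int) (clustering : List (Int × List Int)) (n2c : Option (List (Int × Int))) : Decidable (Pre_extract_subclustering nodes clustering n2c) := by unfold Pre_extract_subclustering; infer_instance
def pvWitness_extract_subclustering : List Int × (List (Int × List Int)) × (Option (List (Int × Int))) := ([1, 2, 1], [(7, [1, 3]), (8, [2])], none)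
def Spec_extract_subclustering (nodes : List Int) (clustering : List (Int × List Int)) (n2c : Option (List (Int × Int))) (out : List (Int × List Int)) : Prop := out = extract_subclustering_alt nodes clustering n2c
instance (nodes : List Int) (clustering : List (Int × List Int)) (n2c : Option (List (Int × Int))) (out : List (Int × List Int)) : Decidable (Spec_extract_subclustering nodes clustering n2c out) := by unfold Spec_extract_subclustering; infer_instance

-- ===== CLAIM (what is proved, stated in full; the proofs are below) =====
def Claim_equal_extract_subclustering : Prop := ∀ (nodes : List Int) (clustering : List (Int × List Int)) (n2c : Option (List (Int × Int))), Dom_extract_subclustering nodes clustering n2c → Pre_extract_subclustering nodes clustering n2c → Spec_extract_subclustering nodes clustering n2c (extract_subclustering nodes clustering n2c)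

-- ===== LEMMAS AND PROOFS =====

-- zip a list with its own map, filter on the second component, project the first:
-- that is a plain filter of the original list.
lemma zip_map_filter_fst (f : Int → Int) (c : Int) (xs : List Int) :
    (((xs.zip (xs.map f)).filter (fun p => p.2 == c)).map (fun p => p.1))
      = xs.filter (fun n => f n == c) := by
  induction xs with
  | nil => rfl
  | cons x xs ih =>
    simp only [List.map_cons, List.zip_cons_cons, List.filter_cons]
    by_cases h : f x = c <;> simp [h, ih]

-- A's grouping loop, as a function of the key map f.
def stepA (f : Int → Int) (nc : PySem.Dict Int (List Int)) (n : Int) : PySem.Dict Int (List Int) :=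
  let c := f n
  if nc.contains c then nc.modify c [] (fun s => PySem.Set.add s n)
  else nc.insert c (PySem.Set.ofList [n])

-- B's grouped dict, as a function of the key map f.
def groupB (f : Int → Int) (xs : List Int) : PySem.Dict Int (List Int) :=
  PySem.Dict.mk ((PySem.List.dedup (xs.map f)).map
    (fun c => (c, PySem.Set.ofList (xs.filter (fun n => f n == c)))))

lemma contains_groupB (f : Int → Int) (xs : List Int) (c : Int) :
    (groupB f xs).contains c = true ↔ c ∈ xs.map f := by
  simp [groupB, PySem.Dict.contains, List.any_map, Function.comp,
    List.any_eq_true]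

lemma get?_mk_map (l : List Int) (v : Int → List Int) (c : Int) (h : c ∈ l) (hnd : l.Nodup) :
    (PySem.Dict.mk (l.map (fun a => (a, v a)))).get? c = some (v c) := by
  induction l with
  | nil => simp at h
  | cons a l ih =>
    rcases List.mem_cons.1 h with rfl | h'
    · simp [PySem.Dict.get?_mk_cons]
    · have ha : a ≠ c := by
        rintro rfl; exact (List.nodup_cons.1 hnd).1 h'
      simp only [List.map_cons, PySem.Dict.get?_mk_cons]
      rw [if_neg (by simpa using ha)]
      exact ih h' (List.nodup_cons.1 hnd).2

lemma filter_eq_nil_of_not_mem_map (f : Int → Int) (xs : List Int) (c : Int)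
    (h : c ∉ xs.map f) : xs.filter (fun n => f n == c) = [] := by
  rw [List.filter_eq_nil_iff]
  intro n hn hc
  exact h (List.mem_map.2 ⟨n, hn, by simpa using hc⟩)

-- one step of A's loop keeps the groupB shape
lemma stepA_groupB (f : Int → Int) (xs : List Int) (x : Int) :
    stepA f (groupB f xs) x = groupB f (xs ++ [x]) := by
  have hdd : PySem.List.dedup ((xs ++ [x]).map f)
      = PySem.Set.add (PySem.List.dedup (xs.map f)) (f x) := by
    simp [PySem.List.dedup_eq_ofList, PySem.Set.ofList, List.foldl_append]
  have hfl : ∀ c, (xs ++ [x]).filter (fun n => f n == c)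
      = xs.filter (fun n => f n == c) ++ if f x = c then [x] else [] := by
    intro c
    by_cases h : f x = c <;> simp [List.filter_append, h]
  by_cases hmem : f x ∈ xs.map f
  · have hd : f x ∈ PySem.List.dedup (xs.map f) := by
      simpa [PySem.List.mem_dedup] using hmem
    have hct : PySem.Set.contains (PySem.List.dedup (xs.map f)) (f x) = true := by
      simp only [PySem.Set.contains]; rw [List.contains_iff_mem]; exact hd
    have hadd : PySem.Set.add (PySem.List.dedup (xs.map f)) (f x)
        = PySem.List.dedup (xs.map f) := by
      simp only [PySem.Set.add]; rw [if_pos hct]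
    have hget : (groupB f xs).get? (f x)
        = some (PySem.Set.ofList (xs.filter (fun n => f n == f x))) := by
      unfold groupB
      exact get?_mk_map _ _ _ hd (PySem.List.nodup_dedup _)
    unfold stepA
    rw [if_pos ((contains_groupB f xs (f x)).2 hmem)]
    unfold PySem.Dict.modify
    rw [PySem.Dict.getD, hget]
    unfold PySem.Dict.insert
    rw [if_pos ((contains_groupB f xs (f x)).2 hmem)]
    unfold groupB
    rw [hdd, hadd]
    congr 1
    simp only [List.map_map, Option.getD_some]
    apply List.map_congr_left
    intro c hc
    simp only [Function.comp_apply]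
    by_cases h : c = f x
    · subst h
      rw [if_pos (by simp)]
      rw [hfl (f x), if_pos rfl]
      simp [PySem.Set.ofList, List.foldl_append]
    · rw [if_neg (by simpa using h)]
      rw [hfl c, if_neg (show ¬ f x = c from fun hh => h hh.symm), List.append_nil]
  · have hd : f x ∉ PySem.List.dedup (xs.map f) := by
      simpa [PySem.List.mem_dedup] using hmem
    have hct : ¬ PySem.Set.contains (PySem.List.dedup (xs.map f)) (f x) = true := by
      simp only [PySem.Set.contains]; rw [List.contains_iff_mem]; exact hd
    have hadd : PySem.Set.add (PySem.List.dedup (xs.map f)) (f x)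
        = PySem.List.dedup (xs.map f) ++ [f x] := by
      simp only [PySem.Set.add]; rw [if_neg hct]
    unfold stepA
    rw [if_neg (fun hcc => hmem ((contains_groupB f xs (f x)).1 hcc))]
    unfold PySem.Dict.insert
    rw [if_neg (fun hcc => hmem ((contains_groupB f xs (f x)).1 hcc))]
    unfold groupB
    rw [hdd, hadd]
    simp only [List.map_append, List.map_cons, List.map_nil]
    have h1 : List.map (fun c => (c, PySem.Set.ofList ((xs ++ [x]).filter (fun n => f n == c))))
        (PySem.List.dedup (xs.map f))
        = List.map (fun c => (c, PySem.Set.ofList (xs.filter (fun n => f n == c))))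
        (PySem.List.dedup (xs.map f)) := by
      apply List.map_congr_left
      intro c hc
      have hc' : c ∈ xs.map f := by simpa [PySem.List.mem_dedup] using hc
      have h : ¬ f x = c := fun hh => hmem (hh ▸ hc')
      rw [hfl c, if_neg h, List.append_nil]
    rw [h1]
    have h2 : (xs ++ [x]).filter (fun n => f n == f x) = [x] := by
      rw [hfl (f x), if_pos rfl, filter_eq_nil_of_not_mem_map f xs (f x) hmem]
      rfl
    rw [h2]

lemma foldl_stepA (f : Int → Int) (xs : List Int) :
    xs.foldl (stepA f) PySem.Dict.empty = groupB f xs := by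
  induction xs using List.reverseRecOn with
  | nil => rfl
  | append_singleton xs x ih =>
    rw [List.foldl_append, ih]
    simpa using stepA_groupB f xs x

-- the two ports agree for ANY fixed key dictionary m
lemma runs_agree (m : PySem.Dict Int Int) (nodes : List Int) :
    (nodes.foldl (stepA (fun n => m.getD n 0)) PySem.Dict.empty).items
    = (PySem.List.dedup (nodes.map (fun n => m.getD n 0))).map
        (fun c => (c, PySem.Set.ofList
          (((nodes.zip (nodes.map (fun n => m.getD n 0))).filter (fun p => p.2 == c)).map (fun p => p.1)))) := by
  rw [foldl_stepA]
  unfold groupB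
  apply List.map_congr_left
  intro c hc
  rw [zip_map_filter_fst]

-- ===== VERDICT (by name: the statement is the Claim_ definition above) =====
theorem extract_subclustering_spec : Claim_equal_extract_subclustering := by
  intro nodes clustering n2c _ _
  unfold Spec_extract_subclustering
  cases n2c with
  | none => exact runs_agree (buildN2C clustering) nodes
  | some d => exact runs_agree (PySem.Dict.ofList d) nodes
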